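-- pv_equiv track=rewrite | github.com/MrBrantCode/unitest_baseline | mut_generate/mist_train_taco/taco_6499/solution.py | find_pairs_with_gcd_lcm
-- ===== SOURCE A (Python) =====
-- def find_pairs_with_gcd_lcm(x, y):
--     if x > y:
--         return 0
--
--     def gcd(m, n):
--         u = max(m, n)
--         v = min(m, n)
--         r = u % v
--         while r > 0:
--             u = v
--             v = r
--             r = u % v
--         return v
--
--     n = y
--     p = x * y
--     arr = []
--     pr = []
--
--     for i in range(1, y + 1):
--         if y % i == 0:
--             arr.append(i)
--
--     for i in range(len(arr)):
--         a = x * arr[i]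
--         b = n * x // a
--         if gcd(a, b) == x:
--             pr.append([a, b])
--
--     return len(pr)
-- ===== SOURCE B (Python) =====
-- def _gcd(a, b):
--     while b:
--         a, b = b, a % b
--     return a
--
--
-- def find_pairs_with_gcd_lcm(x, y):
--     # A pair [a, b] = [x*d, y//d] qualifies iff x*d divides y and
--     # gcd(d, y//(x*d)) == 1, i.e. iff d is a unitary divisor of y//x.
--     # So: answer 0 unless 1 <= x, x <= y and x divides y; otherwise count
--     # unitary divisors of z = y//x, enumerating divisor pairs up to sqrt(z).
--     if x < 1 or x > y or y % x != 0:
--         return 0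
--     z = y // x
--     count = 0
--     i = 1
--     while i * i <= z:
--         if z % i == 0 and _gcd(i, z // i) == 1:
--             count += 1 if i == z // i else 2
--         i += 1
--     return count
-- ===== Notes on version B (the rewrite author's own statement) =====
-- stated objective: faster
-- what changed: A scans all i in 1..y to collect divisors and tests gcd(x*d, y//d)==x with a hand-rolled Euclid for each; B uses the identity that [x*d, y//d] qualifies iff x divides y and d is a unitary divisor of z=y//x, and counts divisor pairs of z by trial division up to sqrt(z) only. Intended as faster (O(sqrt(y/x)) vs O(y)); a timing run measured a 83x median ratio at n=262144 but on inputs where both programs exit through the cheap guard (x>y, or x not dividing y) the two are equally fast, so the measurement is not uniform across inputs.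
-- intended difference: For x < 0 and y >= 1, A returns 1 (its hand-rolled gcd returns the negative minimum immediately, so only d=1 passes the gcd==x test) while B returns 0, the intended count since no pair of positive divisors has a negative gcd. — e.g. on find_pairs_with_gcd_lcm(-3, 12): A returns 1, B returns 0
import Mathlib
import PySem

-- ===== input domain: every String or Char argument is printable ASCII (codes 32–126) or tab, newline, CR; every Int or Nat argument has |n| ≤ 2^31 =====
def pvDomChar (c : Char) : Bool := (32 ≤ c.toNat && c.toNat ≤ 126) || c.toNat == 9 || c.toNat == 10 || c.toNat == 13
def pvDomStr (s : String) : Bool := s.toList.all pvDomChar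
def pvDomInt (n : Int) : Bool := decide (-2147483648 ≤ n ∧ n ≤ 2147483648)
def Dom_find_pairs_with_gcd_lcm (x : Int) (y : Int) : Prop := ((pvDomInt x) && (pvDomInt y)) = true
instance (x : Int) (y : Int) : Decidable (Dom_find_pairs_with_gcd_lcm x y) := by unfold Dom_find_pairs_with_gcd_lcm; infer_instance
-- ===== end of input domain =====

-- B replaces A's full 1..y divisor scan with the identity "[x*d, y//d] qualifies iff x ∣ y and d
-- is a unitary divisor of y//x", counting divisor pairs of y//x up to its square root — intended
-- as faster (timing: 83x median at the largest size, though inputs that exit through the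
-- cheap guard show no difference).

-- ===== PORT A =====
-- A's inner helper gcd: u = max, v = min; r = u % v; while r > 0: u, v = v, r; r = u % v; return v.
-- The 'v = 0' branch is a totalization guard only: Python raises ZeroDivisionError there
-- (unreachable under Pre_).
def pyGcdLoop (u v : Int) : Int :=
  if _hv : v = 0 then v
  else
    let r := PySem.Int.mod u v
    if _hr : 0 < r then pyGcdLoop v r else v
termination_by v.natAbs
decreasing_by
  rcases lt_trichotomy v 0 with hv | hv | hv
  · have h1 := PySem.Int.mod_neg_bounds u hv
    omega
  · exact absurd hv _hv
  · have h1 := PySem.Int.mod_lt u hv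
    omega

def pyGcd (m n : Int) : Int := pyGcdLoop (max m n) (min m n)

def find_pairs_with_gcd_lcm (x : Int) (y : Int) : Int :=
  if x > y then 0
  else
    let n := y
    let _p := x * y
    let arr : List Int := (PySem.List.pyRange 1 (y + 1) 1).foldl
      (fun acc i => if PySem.Int.mod y i = 0 then acc ++ [i] else acc) []
    let pr : List (List Int) := (PySem.List.pyRange 0 (arr.length : Int) 1).foldl
      (fun acc i =>
        let a := x * PySem.List.pyGetD arr i 0
        let b := PySem.Int.floordiv (n * x) a
        if pyGcd a b = x then acc ++ [[a, b]] else acc) []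
    (pr.length : Int)

-- ===== PORT B =====
-- Source B's _gcd: while b: a, b = b, a % b; return a
def gcd2 (a b : Int) : Int :=
  if _hb : b = 0 then a else gcd2 b (PySem.Int.mod a b)
termination_by b.natAbs
decreasing_by
  rcases lt_trichotomy b 0 with hb | hb | hb
  · have h1 := PySem.Int.mod_neg_bounds (a := a) hb
    omega
  · exact absurd hb _hb
  · have h1 := PySem.Int.mod_lt a hb
    have h2 := PySem.Int.mod_nonneg a hb
    omega

-- Source B's while loop: while i * i <= z: if z % i == 0 and _gcd(i, z // i) == 1: count += 1 if i == z // i else 2; i += 1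
def bLoop (z i count : Int) : Int :=
  if _h : i * i ≤ z then
    bLoop z (i + 1)
      (if PySem.Int.mod z i = 0 ∧ gcd2 i (PySem.Int.floordiv z i) = 1 then
        (if i = PySem.Int.floordiv z i then count + 1 else count + 2)
      else count)
  else count
termination_by (z + 1 - i).toNat
decreasing_by
  have hiz : i ≤ z := by nlinarith [mul_self_nonneg i]
  omega

def find_pairs_with_gcd_lcm_alt (x : Int) (y : Int) : Int :=
  if x < 1 then 0
  else if x > y then 0
  else if PySem.Int.mod y x ≠ 0 then 0
  else bLoop (PySem.Int.floordiv y x) 1 0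

-- ===== PRECONDITION & SPEC =====
-- Pre_ excludes exactly the inputs where A raises ZeroDivisionError (x = 0 with y ≥ 1:
-- b = y*x // (x*arr[i]) divides by zero).
def Pre_find_pairs_with_gcd_lcm (x : Int) (y : Int) : Prop := ¬ (x = 0 ∧ 1 ≤ y)
instance (x : Int) (y : Int) : Decidable (Pre_find_pairs_with_gcd_lcm x y) := by
  unfold Pre_find_pairs_with_gcd_lcm; infer_instance

def pvWitness_find_pairs_with_gcd_lcm : Int × Int := (2, 12)

-- For x < 0 and y ≥ 1, A returns 1 (its hand-rolled gcd returns the negative minimum at once, so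
-- only d = 1 passes the 'gcd == x' test) while B returns 0, the intended count: no pair of
-- positive divisors has a negative gcd.
def D_find_pairs_with_gcd_lcm (x : Int) (y : Int) : Prop := x < 0 ∧ 1 ≤ y
instance (x : Int) (y : Int) : Decidable (D_find_pairs_with_gcd_lcm x y) := by
  unfold D_find_pairs_with_gcd_lcm; infer_instance

def Spec_find_pairs_with_gcd_lcm (x : Int) (y : Int) (out : Int) : Prop :=
  ¬ D_find_pairs_with_gcd_lcm x y → out = find_pairs_with_gcd_lcm_alt x y
instance (x : Int) (y : Int) (out : Int) : Decidable (Spec_find_pairs_with_gcd_lcm x y out) := by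
  unfold Spec_find_pairs_with_gcd_lcm; infer_instance

def pvDiffWitness_find_pairs_with_gcd_lcm : Int × Int := (-3, 12)
def pvDiffWitnessOut_find_pairs_with_gcd_lcm : Int × Int := (1, 0)

-- ===== CLAIM (what is proved, stated in full; the proofs are below) =====
def Claim_unchanged_find_pairs_with_gcd_lcm : Prop := ∀ (x : Int) (y : Int), Dom_find_pairs_with_gcd_lcm x y → Pre_find_pairs_with_gcd_lcm x y → Spec_find_pairs_with_gcd_lcm x y (find_pairs_with_gcd_lcm x y)
def Claim_changed_find_pairs_with_gcd_lcm : Prop := Dom_find_pairs_with_gcd_lcm (pvDiffWitness_find_pairs_with_gcd_lcm.1) (pvDiffWitness_find_pairs_with_gcd_lcm.2) ∧ Pre_find_pairs_with_gcd_lcm (pvDiffWitness_find_pairs_with_gcd_lcm.1) (pvDiffWitness_find_pairs_with_gcd_lcm.2) ∧ D_find_pairs_with_gcd_lcm (pvDiffWitness_find_pairs_with_gcd_lcm.1) (pvDiffWitness_find_pairs_with_gcd_lcm.2) ∧ find_pairs_with_gcd_lcm (pvDiffWitness_find_pairs_with_gcd_lcm.1) (pvDiffWitness_find_pairs_with_gcd_lcm.2)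 = pvDiffWitnessOut_find_pairs_with_gcd_lcm.1 ∧ find_pairs_with_gcd_lcm_alt (pvDiffWitness_find_pairs_with_gcd_lcm.1) (pvDiffWitness_find_pairs_with_gcd_lcm.2) = pvDiffWitnessOut_find_pairs_with_gcd_lcm.2 ∧ pvDiffWitnessOut_find_pairs_with_gcd_lcm.1 ≠ pvDiffWitnessOut_find_pairs_with_gcd_lcm.2
def Claim_exact_find_pairs_with_gcd_lcm : Prop := ∀ (x : Int) (y : Int), Dom_find_pairs_with_gcd_lcm x y → Pre_find_pairs_with_gcd_lcm x y → D_find_pairs_with_gcd_lcm x y → find_pairs_with_gcd_lcm x y ≠ find_pairs_with_gcd_lcm_alt x y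

-- ===== LEMMAS AND PROOFS =====

-- pyGcdLoop with a negative second argument returns it at once (r = u % v ≤ 0).
theorem pyGcdLoop_neg (u v : Int) (hv : v < 0) : pyGcdLoop u v = v := by
  have h1 := PySem.Int.mod_neg_bounds u hv
  rw [pyGcdLoop]
  simp only [dif_neg (by omega : ¬ v = 0)]
  simp only [dif_neg (by omega : ¬ 0 < PySem.Int.mod u v)]

-- On positive arguments A's Euclid loop computes the gcd.
theorem pyGcdLoop_eq (n : Nat) : ∀ (u v : Int), v.natAbs ≤ n → 1 ≤ v → 0 ≤ u →
    pyGcdLoop u v = (Int.gcd u v : Int) := by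
  induction n with
  | zero => intro u v h hv _; omega
  | succ n ih =>
    intro u v h hv hu
    have hvne : ¬ v = 0 := by omega
    have hpos : 0 < v := by omega
    have hmodlt := PySem.Int.mod_lt u hpos
    have hmodge := PySem.Int.mod_nonneg u hpos
    have hemod : PySem.Int.mod u v = u % v := PySem.Int.mod_eq_emod_of_pos hpos
    rw [pyGcdLoop]
    simp only [dif_neg hvne]
    by_cases hr : 0 < PySem.Int.mod u v
    · simp only [dif_pos hr]
      rw [ih v (PySem.Int.mod u v) (by omega) (by omega) (by omega)]
      rw [hemod, Int.gcd_comm v (u % v), Int.gcd_emod]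
    · simp only [dif_neg hr]
      have hz : u % v = 0 := by omega
      have hdvd : v ∣ u := Int.dvd_of_emod_eq_zero hz
      exact ((Int.gcd_eq_right_iff_dvd (by omega)).mpr hdvd).symm

theorem pyGcd_eq (m n : Int) (hm : 1 ≤ m) (hn : 1 ≤ n) : pyGcd m n = (Int.gcd m n : Int) := by
  unfold pyGcd
  rcases le_total m n with h | h
  · rw [max_eq_right h, min_eq_left h, pyGcdLoop_eq m.natAbs n m le_rfl hm (by omega),
      Int.gcd_comm]
  · rw [max_eq_left h, min_eq_right h, pyGcdLoop_eq n.natAbs m n le_rfl hn (by omega)]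

-- Source B's _gcd computes the gcd on nonnegative arguments.
theorem gcd2_eq (n : Nat) : ∀ (a b : Int), b.natAbs ≤ n → 0 ≤ a → 0 ≤ b →
    gcd2 a b = (Int.gcd a b : Int) := by
  induction n with
  | zero =>
    intro a b h ha hb0
    have hb : b = 0 := by omega
    rw [gcd2, dif_pos hb, hb, Int.gcd_zero_right, Int.natAbs_of_nonneg ha]
  | succ n ih =>
    intro a b h ha hb
    rw [gcd2]
    by_cases hbz : b = 0
    · rw [dif_pos hbz, hbz, Int.gcd_zero_right, Int.natAbs_of_nonneg ha]
    · have hpos : 0 < b := by omega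
      have hmodlt := PySem.Int.mod_lt a hpos
      have hmodge := PySem.Int.mod_nonneg a hpos
      have hemod : PySem.Int.mod a b = a % b := PySem.Int.mod_eq_emod_of_pos hpos
      simp only [dif_neg hbz]
      rw [ih b (PySem.Int.mod a b) (by omega) (by omega) (by omega)]
      rw [hemod, Int.gcd_comm b (a % b), Int.gcd_emod]

-- Exact integer division: (c*k) // c = k.
theorem floordiv_exact (c k : Int) (hc : c ≠ 0) : PySem.Int.floordiv (c * k) c = k := by
  simp [PySem.Int.floordiv]
  exact Int.mul_fdiv_cancel_left k hc

-- A, past its guard, is a count over the divisor list it builds.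
theorem A_unfold (x y : Int) (h : ¬ x > y) :
    find_pairs_with_gcd_lcm x y =
      ((((PySem.List.pyRange 1 (y + 1) 1).filter (fun i => decide (PySem.Int.mod y i = 0))).countP
        (fun d => decide (pyGcd (x * d) (PySem.Int.floordiv (y * x) (x * d)) = x)) : Nat) : Int) := by
  rw [find_pairs_with_gcd_lcm, if_neg h]
  simp only []
  rw [PySem.List.foldl_append_ite_eq_filter]
  rw [PySem.List.foldl_pyRange_zero_pyGetD'
    (f := fun (acc : List (List Int)) (v : Int) =>
      if pyGcd (x * v) (PySem.Int.floordiv (y * x) (x * v)) = x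
      then acc ++ [[x * v, PySem.Int.floordiv (y * x) (x * v)]] else acc)]
  rw [PySem.List.foldl_append_ite
    (p := fun v => pyGcd (x * v) (PySem.Int.floordiv (y * x) (x * v)) = x)
    (f := fun v => [x * v, PySem.Int.floordiv (y * x) (x * v)])]
  simp [List.countP_eq_length_filter]

-- The qualification test A runs for a divisor-candidate d, in Nat terms.
theorem condA_iff (x y d : Int) (hx : 1 ≤ x) (hy : 1 ≤ y) (hd : 1 ≤ d) (_hdy : d ≤ y) :
    ((PySem.Int.mod y d = 0) ∧ pyGcd (x * d) (PySem.Int.floordiv (y * x) (x * d)) = x)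
      ↔ (d.toNat ∣ y.toNat ∧ Nat.gcd (x.toNat * d.toNat) (y.toNat / d.toNat) = x.toNat) := by
  have hxc : (x.toNat : Int) = x := Int.toNat_of_nonneg (by omega)
  have hyc : (y.toNat : Int) = y := Int.toNat_of_nonneg (by omega)
  have hdc : (d.toNat : Int) = d := Int.toNat_of_nonneg (by omega)
  have hdvd_iff : PySem.Int.mod y d = 0 ↔ d.toNat ∣ y.toNat := by
    rw [PySem.Int.mod_eq_zero_iff_dvd]
    constructor
    · intro h
      have h2 : (d.toNat : Int) ∣ (y.toNat : Int) := by rw [hdc, hyc]; exact h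
      exact_mod_cast h2
    · intro h
      have h2 : (d.toNat : Int) ∣ (y.toNat : Int) := by exact_mod_cast h
      rw [hdc, hyc] at h2
      exact h2
  rw [hdvd_iff]
  constructor
  · rintro ⟨hdvd, hg⟩
    refine ⟨hdvd, ?_⟩
    have hq : y.toNat = d.toNat * (y.toNat / d.toNat) := (Nat.mul_div_cancel' hdvd).symm
    have hyq : y = d * ((y.toNat / d.toNat : Nat) : Int) := by
      have h3 : ((d.toNat : Nat) : Int) * ((y.toNat / d.toNat : Nat) : Int) = ((y.toNat : Nat) : Int) := by
        exact_mod_cast congrArg (Nat.cast : Nat → Int) hq.symm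
      rw [hdc, hyc] at h3
      exact h3.symm
    have hb : PySem.Int.floordiv (y * x) (x * d) = ((y.toNat / d.toNat : Nat) : Int) := by
      have hrw : y * x = (x * d) * ((y.toNat / d.toNat : Nat) : Int) := by
        conv_lhs => rw [hyq]
        ring
      rw [hrw]
      exact floordiv_exact _ _ (by nlinarith)
    rw [hb] at hg
    have hq1 : 1 ≤ y.toNat / d.toNat :=
      Nat.div_pos (Nat.le_of_dvd (by omega) hdvd) (by omega)
    rw [pyGcd_eq _ _ (by nlinarith) (by exact_mod_cast hq1)] at hg
    rw [show x * d = ((x.toNat * d.toNat : Nat) : Int) by push_cast [hxc, hdc]; ring] at hg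
    rw [Int.gcd_natCast_natCast] at hg
    rw [← hxc] at hg
    exact_mod_cast hg
  · rintro ⟨hdvd, hg⟩
    refine ⟨hdvd, ?_⟩
    have hq : y.toNat = d.toNat * (y.toNat / d.toNat) := (Nat.mul_div_cancel' hdvd).symm
    have hyq : y = d * ((y.toNat / d.toNat : Nat) : Int) := by
      have h3 : ((d.toNat : Nat) : Int) * ((y.toNat / d.toNat : Nat) : Int) = ((y.toNat : Nat) : Int) := by
        exact_mod_cast congrArg (Nat.cast : Nat → Int) hq.symm
      rw [hdc, hyc] at h3
      exact h3.symm
    have hb : PySem.Int.floordiv (y * x) (x * d) = ((y.toNat / d.toNat : Nat) : Int) := by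
      have hrw : y * x = (x * d) * ((y.toNat / d.toNat : Nat) : Int) := by
        conv_lhs => rw [hyq]
        ring
      rw [hrw]
      exact floordiv_exact _ _ (by nlinarith)
    rw [hb]
    have hq1 : 1 ≤ y.toNat / d.toNat :=
      Nat.div_pos (Nat.le_of_dvd (by omega) hdvd) (by omega)
    rw [pyGcd_eq _ _ (by nlinarith) (by exact_mod_cast hq1)]
    rw [show x * d = ((x.toNat * d.toNat : Nat) : Int) by push_cast [hxc, hdc]; ring]
    rw [Int.gcd_natCast_natCast, hg, hxc]

-- countP over a shifted List.range is a Finset card over Ico 1 (n+1).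
theorem countP_shift (n : Nat) (p : Nat → Prop) [DecidablePred p] :
    (List.range n).countP (fun k => decide (p (k + 1)))
      = ((Finset.Ico 1 (n + 1)).filter p).card := by
  induction n with
  | zero => simp
  | succ n ih =>
    rw [List.range_succ, List.countP_append]
    have hins : Finset.Ico 1 (n + 1 + 1) = insert (n + 1) (Finset.Ico 1 (n + 1)) :=
      Nat.Ico_succ_right_eq_insert_Ico (by omega)
    rw [hins, Finset.filter_insert]
    by_cases hp : p (n + 1)
    · rw [if_pos hp, Finset.card_insert_of_notMem (by simp), ih]
      simp [hp]
    · rw [if_neg hp, ih]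
      simp [hp]

-- A's result in Nat terms, for 1 ≤ x ≤ y.
theorem A_eq_card (x y : Int) (hx : 1 ≤ x) (hxy : x ≤ y) :
    find_pairs_with_gcd_lcm x y =
      ((((Finset.Ico 1 (y.toNat + 1)).filter
        (fun d => d ∣ y.toNat ∧ Nat.gcd (x.toNat * d) (y.toNat / d) = x.toNat)).card : Nat) : Int) := by
  have hy : 1 ≤ y := le_trans hx hxy
  rw [A_unfold x y (by omega), List.countP_filter]
  rw [PySem.List.pyRange_one 1 (y + 1)]
  rw [List.countP_map]
  rw [show (y + 1 - 1).toNat = y.toNat by omega]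
  rw [List.countP_congr (q := fun k =>
      decide ((k + 1) ∣ y.toNat ∧ Nat.gcd (x.toNat * (k + 1)) (y.toNat / (k + 1)) = x.toNat)) ?_]
  · exact_mod_cast countP_shift y.toNat
      (fun d => d ∣ y.toNat ∧ Nat.gcd (x.toNat * d) (y.toNat / d) = x.toNat)
  · intro k hk
    rw [List.mem_range] at hk
    have h1 : (1 : Int) ≤ 1 + (k : Int) := by omega
    have h2 : (1 : Int) + (k : Int) ≤ y := by omega
    have := condA_iff x y (1 + (k : Int)) hx hy h1 h2
    have htn : (1 + (k : Int)).toNat = k + 1 := by omega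
    rw [htn] at this
    simp only [Function.comp_apply, Bool.and_eq_true, decide_eq_true_eq]
    rw [← this]
    tauto

-- gcd(X*d, e) = X unfolds to "X divides e and d is coprime to e/X".
theorem gcd_mul_eq_iff (X d e : Nat) (hX : 0 < X) :
    Nat.gcd (X * d) e = X ↔ X ∣ e ∧ Nat.gcd d (e / X) = 1 := by
  constructor
  · intro h
    have h1 : X ∣ e := h ▸ Nat.gcd_dvd_right (X * d) e
    obtain ⟨f, rfl⟩ := h1
    rw [Nat.gcd_mul_left] at h
    have hg : Nat.gcd d f = 1 := Nat.eq_of_mul_eq_mul_left hX (h.trans (mul_one X).symm)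
    exact ⟨Dvd.intro f rfl, by rw [Nat.mul_div_cancel_left f hX]; exact hg⟩
  · rintro ⟨⟨f, rfl⟩, hg⟩
    rw [Nat.mul_div_cancel_left f hX] at hg
    rw [Nat.gcd_mul_left, hg, mul_one]

-- d ∣ Y together with X ∣ Y/d says exactly that d divides Y/X.
theorem dvd_transfer (X Y d : Nat) (hY : 0 < Y) (hXY : X ∣ Y) :
    (d ∣ Y ∧ X ∣ Y / d) ↔ d ∣ Y / X := by
  constructor
  · rintro ⟨hdY, hXq⟩
    rw [Nat.dvd_div_iff_mul_dvd hXY]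
    obtain ⟨m, hm⟩ := hXq
    have h2 : Y = d * (X * m) := by rw [← hm, Nat.mul_div_cancel' hdY]
    exact ⟨m, by rw [h2]; ring⟩
  · intro h
    have hmul : X * d ∣ Y := (Nat.dvd_div_iff_mul_dvd hXY).mp h
    obtain ⟨m, hm⟩ := hmul
    have hd : 0 < d := by
      rcases Nat.eq_zero_or_pos d with h0 | h0
      · subst h0
        simp at hm
        omega
      · exact h0
    constructor
    · exact ⟨X * m, by rw [hm]; ring⟩
    · refine ⟨m, ?_⟩
      rw [hm, show X * d * m = d * (X * m) by ring, Nat.mul_div_cancel_left _ hd]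

-- When x ∤ y no candidate ever qualifies.
theorem notdvd_empty (X Y : Nat) (hX : 0 < X) (_hY : 0 < Y) (h : ¬ X ∣ Y) :
    (Finset.Ico 1 (Y + 1)).filter (fun d => d ∣ Y ∧ Nat.gcd (X * d) (Y / d) = X) = ∅ := by
  rw [Finset.filter_eq_empty_iff]
  rintro d _ ⟨hdY, hg⟩
  have h1 : X ∣ Y / d := ((gcd_mul_eq_iff X d (Y / d) hX).mp hg).1
  exact h (h1.trans (Nat.div_dvd_of_dvd hdY))

-- Reindexing the qualifying divisors of Y as the unitary divisors of Z = Y/X.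
theorem reindex (X Y : Nat) (hX : 1 ≤ X) (hY : 1 ≤ Y) (hdvd : X ∣ Y) :
    (Finset.Ico 1 (Y + 1)).filter (fun d => d ∣ Y ∧ Nat.gcd (X * d) (Y / d) = X)
      = (Finset.Ico 1 (Y / X + 1)).filter (fun d => d ∣ Y / X ∧ Nat.gcd d (Y / X / d) = 1) := by
  have hZ : 1 ≤ Y / X := Nat.div_pos (Nat.le_of_dvd (by omega) hdvd) (by omega)
  ext a
  simp only [Finset.mem_filter, Finset.mem_Ico]
  constructor
  · rintro ⟨⟨ha1, _⟩, hdY, hg⟩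
    rw [gcd_mul_eq_iff X a (Y / a) (by omega)] at hg
    have haZ : a ∣ Y / X := (dvd_transfer X Y a (by omega) hdvd).mp ⟨hdY, hg.1⟩
    refine ⟨⟨ha1, by have := Nat.le_of_dvd (by omega) haZ; omega⟩, haZ, ?_⟩
    have : Y / a / X = Y / X / a := by
      rw [Nat.div_div_eq_div_mul, Nat.div_div_eq_div_mul, Nat.mul_comm]
    rw [← this]
    exact hg.2
  · rintro ⟨⟨ha1, _⟩, haZ, hg⟩
    have h2 := (dvd_transfer X Y a (by omega) hdvd).mpr haZ
    refine ⟨⟨ha1, by have := Nat.le_of_dvd (by omega) h2.1; omega⟩, h2.1, ?_⟩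
    rw [gcd_mul_eq_iff X a (Y / a) (by omega)]
    refine ⟨h2.2, ?_⟩
    have : Y / a / X = Y / X / a := by
      rw [Nat.div_div_eq_div_mul, Nat.div_div_eq_div_mul, Nat.mul_comm]
    rw [this]
    exact hg

-- Counting unitary divisors of Z by pairing d with Z/d across the square root.
theorem pairing (Z : Nat) (hZ : 1 ≤ Z) :
    ((((Finset.Ico 1 (Z + 1)).filter (fun d => d ∣ Z ∧ Nat.gcd d (Z / d) = 1)).card : Nat) : Int)
      = ∑ i ∈ Finset.Ico 1 (Nat.sqrt Z + 1),
          (if i ∣ Z ∧ Nat.gcd i (Z / i) = 1 then (if i = Z / i then (1 : Int) else 2) else 0) := by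
  have hs1 : 1 ≤ Nat.sqrt Z := Nat.sqrt_pos.mpr (by omega)
  have hsZ : Nat.sqrt Z ≤ Z := Nat.sqrt_le_self Z
  have hsqZ : Nat.sqrt Z * Nat.sqrt Z ≤ Z := Nat.sqrt_le Z
  have hZsq : Z < (Nat.sqrt Z + 1) * (Nat.sqrt Z + 1) := Nat.lt_succ_sqrt Z
  rw [← Finset.sum_filter]
  have hsplit :
      ((Finset.Ico 1 (Z + 1)).filter (fun d => d ∣ Z ∧ Nat.gcd d (Z / d) = 1)).card
        = (((Finset.Ico 1 (Z + 1)).filter (fun d => d ∣ Z ∧ Nat.gcd d (Z / d) = 1)).filter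
            (fun d => d ≤ Nat.sqrt Z)).card
          + (((Finset.Ico 1 (Z + 1)).filter (fun d => d ∣ Z ∧ Nat.gcd d (Z / d) = 1)).filter
            (fun d => ¬ d ≤ Nat.sqrt Z)).card :=
    (Finset.card_filter_add_card_filter_not _).symm
  have hT : ((Finset.Ico 1 (Z + 1)).filter (fun d => d ∣ Z ∧ Nat.gcd d (Z / d) = 1)).filter
      (fun d => d ≤ Nat.sqrt Z)
      = (Finset.Ico 1 (Nat.sqrt Z + 1)).filter (fun d => d ∣ Z ∧ Nat.gcd d (Z / d) = 1) := by
    ext a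
    simp only [Finset.mem_filter, Finset.mem_Ico]
    constructor
    · rintro ⟨⟨⟨h1, h2⟩, h3⟩, h4⟩
      exact ⟨⟨h1, by omega⟩, h3⟩
    · rintro ⟨⟨h1, h2⟩, h3⟩
      exact ⟨⟨⟨h1, by omega⟩, h3⟩, by omega⟩
  -- the large qualifying divisors biject with the small ones distinct from their partner
  have hbij : (((Finset.Ico 1 (Z + 1)).filter (fun d => d ∣ Z ∧ Nat.gcd d (Z / d) = 1)).filter
      (fun d => ¬ d ≤ Nat.sqrt Z)).card
      = (((Finset.Ico 1 (Nat.sqrt Z + 1)).filter (fun d => d ∣ Z ∧ Nat.gcd d (Z / d) = 1)).filter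
          (fun i => ¬ i = Z / i)).card := by
    apply Finset.card_bij' (i := fun d _ => Z / d) (j := fun i _ => Z / i)
    · intro d hd
      simp only [Finset.mem_filter, Finset.mem_Ico] at hd ⊢
      obtain ⟨⟨⟨hd1, hd2⟩, hdvd, hg⟩, hbig⟩ := hd
      have hq1 : 1 ≤ Z / d := Nat.div_pos (Nat.le_of_dvd (by omega) hdvd) (by omega)
      have hqle : Z / d ≤ Nat.sqrt Z := by
        have h5 : Z / d ≤ Z / (Nat.sqrt Z + 1) := Nat.div_le_div_left (by omega) (by omega)
        have h6 : Z / (Nat.sqrt Z + 1) < Nat.sqrt Z + 1 :=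
          (Nat.div_lt_iff_lt_mul (by omega)).mpr hZsq
        omega
      have hqq : Z / (Z / d) = d := Nat.div_div_self hdvd (by omega)
      refine ⟨⟨⟨hq1, by omega⟩, Nat.div_dvd_of_dvd hdvd, by rw [hqq, Nat.gcd_comm]; exact hg⟩, ?_⟩
      intro heq
      rw [hqq] at heq
      have : Z = d * d := by
        conv_lhs => rw [← Nat.mul_div_cancel' hdvd]
        rw [heq]
      have : Nat.sqrt Z = d := by rw [this, ← Nat.pow_two, Nat.sqrt_eq']
      omega
    · intro i hi
      simp only [Finset.mem_filter, Finset.mem_Ico] at hi ⊢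
      obtain ⟨⟨⟨hi1, hi2⟩, hdvd, hg⟩, hne⟩ := hi
      have hq1 : 1 ≤ Z / i := Nat.div_pos (Nat.le_of_dvd (by omega) hdvd) (by omega)
      have hqZ : Z / i ≤ Z := Nat.div_le_self Z i
      have hqq : Z / (Z / i) = i := Nat.div_div_self hdvd (by omega)
      have hbig : ¬ Z / i ≤ Nat.sqrt Z := by
        intro hle
        have hmul : i * (Z / i) = Z := Nat.mul_div_cancel' hdvd
        have h7 : Z = Nat.sqrt Z * Nat.sqrt Z := by nlinarith
        have hi_eq : i = Nat.sqrt Z := by nlinarith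
        have hq_eq : Z / i = Nat.sqrt Z := by nlinarith
        omega
      exact ⟨⟨⟨hq1, by omega⟩, Nat.div_dvd_of_dvd hdvd, by rw [hqq, Nat.gcd_comm]; exact hg⟩, hbig⟩
    · intro d hd
      simp only [Finset.mem_filter, Finset.mem_Ico] at hd
      exact Nat.div_div_self hd.1.2.1 (by omega)
    · intro i hi
      simp only [Finset.mem_filter, Finset.mem_Ico] at hi
      exact Nat.div_div_self hi.1.2.1 (by omega)
  rw [hsplit, hT, hbij]
  -- finally, the weighted sum over the small qualifying divisors
  have hw : ∀ i ∈ (Finset.Ico 1 (Nat.sqrt Z + 1)).filter (fun d => d ∣ Z ∧ Nat.gcd d (Z / d) = 1),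
      (if i = Z / i then (1 : Int) else 2) = 1 + (if ¬ i = Z / i then (1 : Int) else 0) := by
    intro i _
    by_cases h : i = Z / i
    · rw [if_pos h, if_neg (not_not_intro h)]
      norm_num
    · rw [if_neg h, if_pos h]
      norm_num
  rw [Finset.sum_congr rfl hw, Finset.sum_add_distrib, Finset.sum_const, Finset.sum_boole]
  push_cast
  ring

-- B's trial-division loop computes the weighted sum over candidates from i up to sqrt(Z).
theorem bLoop_eq (Z : Nat) (_hZ : 1 ≤ Z) (n : Nat) : ∀ (i c : Int), 1 ≤ i → (Nat.sqrt Z + 1 : Int) - i ≤ n →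
    bLoop (Z : Int) i c = c + ∑ j ∈ Finset.Ico i.toNat (Nat.sqrt Z + 1),
        (if j ∣ Z ∧ Nat.gcd j (Z / j) = 1 then (if j = Z / j then (1 : Int) else 2) else 0) := by
  induction n with
  | zero =>
    intro i c hi hn
    have hstop : ¬ i * i ≤ (Z : Int) := by
      intro hle
      have h1 : (i.toNat : Int) = i := Int.toNat_of_nonneg (by omega)
      have h2 : i.toNat * i.toNat ≤ Z := by exact_mod_cast h1 ▸ hle
      have h3 := Nat.le_sqrt.mpr h2
      omega
    rw [bLoop, dif_neg hstop, Finset.Ico_eq_empty (by omega), Finset.sum_empty, add_zero]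
  | succ n ih =>
    intro i c hi hn
    have hic : (i.toNat : Int) = i := Int.toNat_of_nonneg (by omega)
    by_cases hle : i * i ≤ (Z : Int)
    · have h2 : i.toNat * i.toNat ≤ Z := by exact_mod_cast hic ▸ hle
      have h3 : i.toNat ≤ Nat.sqrt Z := Nat.le_sqrt.mpr h2
      rw [bLoop, dif_pos hle]
      have hih1 : (1 : Int) ≤ i + 1 := by omega
      have hih2 : ((Nat.sqrt Z : Int) + 1) - (i + 1) ≤ (n : Int) := by omega
      rw [ih (i + 1) _ hih1 hih2]
      rw [Finset.sum_eq_sum_Ico_succ_bot (a := i.toNat) (b := Nat.sqrt Z + 1) (by omega)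
        (f := fun j => (if j ∣ Z ∧ Nat.gcd j (Z / j) = 1 then (if j = Z / j then (1 : Int) else 2) else 0))]
      have htn : (i + 1).toNat = i.toNat + 1 := by omega
      rw [htn]
      have hcond : (PySem.Int.mod (Z : Int) i = 0 ∧ gcd2 i (PySem.Int.floordiv (Z : Int) i) = 1)
          ↔ (i.toNat ∣ Z ∧ Nat.gcd i.toNat (Z / i.toNat) = 1) := by
        have hfd : PySem.Int.floordiv (Z : Int) i = ((Z / i.toNat : Nat) : Int) := by
          rw [← hic]
          exact_mod_cast PySem.Int.floordiv_natCast Z i.toNat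
        have hmd : PySem.Int.mod (Z : Int) i = 0 ↔ i.toNat ∣ Z := by
          rw [PySem.Int.mod_eq_zero_iff_dvd]
          conv_lhs => rw [← hic]
          exact Int.natCast_dvd_natCast
        have hg : gcd2 i (PySem.Int.floordiv (Z : Int) i) = ((Nat.gcd i.toNat (Z / i.toNat) : Nat) : Int) := by
          rw [hfd, gcd2_eq ((Z / i.toNat : Nat) : Int).natAbs i _ le_rfl (by omega) (by positivity)]
          rw [show Int.gcd i ((Z / i.toNat : Nat) : Int)
              = Int.gcd ((i.toNat : Nat) : Int) ((Z / i.toNat : Nat) : Int) from by rw [hic]]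
          rw [Int.gcd_natCast_natCast]
        rw [hmd, hg]
        constructor
        · rintro ⟨h4, h5⟩
          exact ⟨h4, by exact_mod_cast h5⟩
        · rintro ⟨h4, h5⟩
          exact ⟨h4, by exact_mod_cast h5⟩
      have hiq : (i = PySem.Int.floordiv (Z : Int) i) ↔ (i.toNat = Z / i.toNat) := by
        have hfd : PySem.Int.floordiv (Z : Int) i = ((Z / i.toNat : Nat) : Int) := by
          rw [← hic]
          exact_mod_cast PySem.Int.floordiv_natCast Z i.toNat
        rw [hfd]
        conv_lhs => rw [← hic]
        exact Int.natCast_inj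
      rw [← add_assoc]
      congr 1
      by_cases hc : i.toNat ∣ Z ∧ Nat.gcd i.toNat (Z / i.toNat) = 1
      · rw [if_pos (hcond.mpr hc), if_pos hc]
        by_cases he : i.toNat = Z / i.toNat
        · rw [if_pos (hiq.mpr he), if_pos he]
        · rw [if_neg (fun h => he (hiq.mp h)), if_neg he]
      · rw [if_neg (fun h => hc (hcond.mp h)), if_neg hc]
        ring
    · have h3 : Nat.sqrt Z < i.toNat := by
        by_contra h4
        apply hle
        have h5 : i.toNat * i.toNat ≤ Z := Nat.le_sqrt.mp (by omega)
        calc i * i = ((i.toNat * i.toNat : Nat) : Int) := by push_cast [hic]; ring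
          _ ≤ (Z : Int) := by exact_mod_cast h5
      rw [bLoop, dif_neg hle, Finset.Ico_eq_empty (by omega), Finset.sum_empty, add_zero]

-- For negative x, A's gcd helper returns the negative min(a, b) at once, so only d = 1 qualifies.
theorem A_neg (x y : Int) (hx : x < 0) (hy : 1 ≤ y) : find_pairs_with_gcd_lcm x y = 1 := by
  rw [A_unfold x y (by omega)]
  have hcong : ((PySem.List.pyRange 1 (y + 1) 1).filter (fun i => decide (PySem.Int.mod y i = 0))).countP
        (fun d => decide (pyGcd (x * d) (PySem.Int.floordiv (y * x) (x * d)) = x))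
      = ((PySem.List.pyRange 1 (y + 1) 1).filter (fun i => decide (PySem.Int.mod y i = 0))).countP
        (fun d => d == 1) := by
    apply List.countP_congr
    intro d hd
    have hmem := List.mem_of_mem_filter hd
    have hdvd0 : PySem.Int.mod y d = 0 := by simpa using List.of_mem_filter hd
    rw [PySem.List.mem_pyRange_one] at hmem
    have hdInt : d ∣ y := (PySem.Int.mod_eq_zero_iff_dvd _ _).mp hdvd0
    obtain ⟨k, hk⟩ := hdInt
    have hk1 : 1 ≤ k := by nlinarith
    have hb : PySem.Int.floordiv (y * x) (x * d) = k := by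
      have hrw : y * x = (x * d) * k := by rw [hk]; ring
      rw [hrw]
      exact floordiv_exact _ _ (by nlinarith)
    have hgcd : pyGcd (x * d) k = x * d := by
      unfold pyGcd
      rw [max_eq_right (by nlinarith : x * d ≤ k), min_eq_left (by nlinarith : x * d ≤ k)]
      exact pyGcdLoop_neg k (x * d) (by nlinarith)
    simp only [hb, hgcd, decide_eq_true_eq, beq_iff_eq]
    constructor
    · intro h
      exact mul_left_cancel₀ (by omega : x ≠ 0) (by rw [mul_one]; exact h)
    · intro h
      rw [h, mul_one]
  rw [hcong]
  have hnodup : ((PySem.List.pyRange 1 (y + 1) 1).filter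
      (fun i => decide (PySem.Int.mod y i = 0))).Nodup :=
    (PySem.List.nodup_pyRange_one 1 (y + 1)).filter _
  have hmem1 : (1 : Int) ∈ (PySem.List.pyRange 1 (y + 1) 1).filter
      (fun i => decide (PySem.Int.mod y i = 0)) := by
    apply List.mem_filter.mpr
    refine ⟨PySem.List.mem_pyRange_one.mpr ⟨le_refl 1, by omega⟩, ?_⟩
    simp
  have h1 : ((PySem.List.pyRange 1 (y + 1) 1).filter
      (fun i => decide (PySem.Int.mod y i = 0))).count 1 = 1 :=
    Nat.le_antisymm (List.nodup_iff_count_le_one.mp hnodup 1) (List.count_pos_iff.mpr hmem1)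
  rw [show (fun d : Int => d == 1) = (· == (1 : Int)) from rfl]
  rw [← List.count]
  rw [h1]
  norm_num

-- Both programs agree for 1 ≤ x ≤ y.
theorem main_pos (x y : Int) (hx : 1 ≤ x) (hxy : x ≤ y) :
    find_pairs_with_gcd_lcm x y = find_pairs_with_gcd_lcm_alt x y := by
  have hy : 1 ≤ y := le_trans hx hxy
  have hxc : (x.toNat : Int) = x := Int.toNat_of_nonneg (by omega)
  have hyc : (y.toNat : Int) = y := Int.toNat_of_nonneg (by omega)
  rw [A_eq_card x y hx hxy, find_pairs_with_gcd_lcm_alt, if_neg (by omega), if_neg (by omega)]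
  by_cases hmod : PySem.Int.mod y x = 0
  · rw [if_neg (not_not_intro hmod)]
    have hdvd : x.toNat ∣ y.toNat := by
      have h1 : x ∣ y := (PySem.Int.mod_eq_zero_iff_dvd _ _).mp hmod
      have h2 : (x.toNat : Int) ∣ (y.toNat : Int) := by rw [hxc, hyc]; exact h1
      exact_mod_cast h2
    have hZ : 1 ≤ y.toNat / x.toNat := Nat.div_pos (Nat.le_of_dvd (by omega) hdvd) (by omega)
    have hfd : PySem.Int.floordiv y x = ((y.toNat / x.toNat : Nat) : Int) := by
      have h3 := PySem.Int.floordiv_natCast y.toNat x.toNat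
      rw [hxc, hyc] at h3
      exact h3
    rw [hfd]
    rw [bLoop_eq (y.toNat / x.toNat) hZ (Nat.sqrt (y.toNat / x.toNat) + 1) 1 0 (by omega) (by omega)]
    rw [zero_add, show (1 : Int).toNat = 1 from rfl]
    rw [reindex x.toNat y.toNat (by omega) (by omega) hdvd]
    exact pairing (y.toNat / x.toNat) hZ
  · rw [if_pos hmod]
    have hnd : ¬ x.toNat ∣ y.toNat := by
      intro h
      apply hmod
      rw [PySem.Int.mod_eq_zero_iff_dvd, ← hxc, ← hyc]
      exact_mod_cast h
    rw [notdvd_empty x.toNat y.toNat (by omega) (by omega) hnd]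
    simp

-- ===== VERDICT (by name: the statement is the Claim_ definition above) =====
theorem find_pairs_with_gcd_lcm_spec : Claim_unchanged_find_pairs_with_gcd_lcm := by
  unfold Claim_unchanged_find_pairs_with_gcd_lcm
  intro x y _ hpre hnd
  unfold Pre_find_pairs_with_gcd_lcm at hpre
  unfold D_find_pairs_with_gcd_lcm at hnd
  by_cases h1 : x > y
  · rw [find_pairs_with_gcd_lcm, if_pos h1, find_pairs_with_gcd_lcm_alt]
    by_cases h2 : x < 1
    · rw [if_pos h2]
    · rw [if_neg h2, if_pos h1]
  · by_cases hy : 1 ≤ y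
    · have hx1 : 1 ≤ x := by
        rcases lt_trichotomy x 0 with h | h | h
        · exact absurd ⟨h, hy⟩ hnd
        · exact absurd ⟨h, hy⟩ hpre
        · omega
      exact main_pos x y hx1 (by omega)
    · rw [A_unfold x y h1, PySem.List.pyRange_one_eq_nil (by omega),
        find_pairs_with_gcd_lcm_alt, if_pos (by omega)]
      simp

theorem find_pairs_with_gcd_lcm_changed : Claim_changed_find_pairs_with_gcd_lcm := by
  unfold Claim_changed_find_pairs_with_gcd_lcm
  refine ⟨by decide, by decide, by decide, ?_, ?_, by decide⟩
  · exact A_neg (-3) 12 (by norm_num) (by norm_num)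
  · rw [show find_pairs_with_gcd_lcm_alt pvDiffWitness_find_pairs_with_gcd_lcm.1
        pvDiffWitness_find_pairs_with_gcd_lcm.2 = find_pairs_with_gcd_lcm_alt (-3) 12 from rfl]
    rw [find_pairs_with_gcd_lcm_alt, if_pos (by norm_num)]
    rfl

theorem find_pairs_with_gcd_lcm_tight : Claim_exact_find_pairs_with_gcd_lcm := by
  unfold Claim_exact_find_pairs_with_gcd_lcm
  intro x y _ _ hd
  unfold D_find_pairs_with_gcd_lcm at hd
  rw [A_neg x y hd.1 hd.2, find_pairs_with_gcd_lcm_alt, if_pos (by omega)]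
  norm_num
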